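-- pv_equiv track=rewrite | github.com/Alice2hang/RL_trolley_puzzles | dual_model/src/generate_data.py | get_within
-- ===== SOURCE A (Python) =====
-- def get_within(steps,location):
--     '''
--     Helper function to get all positions within n steps of a given location, including location
--     '''
--     within = set([location])
--     pos_list = [location]
--     possible_moves = (1,0),(-1,0),(0,1),(0,-1)
--     for i in range(steps):
--         new_pos_list = []
--         for pos in pos_list:
--             for move in possible_moves:
--                 new_pos = (pos[0]+move[0],pos[1]+move[1])
--                 if new_pos not in within:
--                     new_pos_list.append(new_pos)
--                     within.add(new_pos)
--         pos_list = new_pos_list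
--     return within
-- ===== SOURCE B (Python) =====
-- def get_within(steps, location):
--     '''
--     All grid positions within n steps (Manhattan distance) of location, including location.
--     Direct enumeration of the diamond, ring by ring, instead of BFS with a frontier.
--     '''
--     x, y = location
--     within = set([location])
--     for r in range(1, steps + 1):
--         for k in range(r):                                # dx > 0 side: dx = r-k
--             within.add((x + r - k, y + k))
--             within.add((x + r - k, y - k))
--         for k in range(r):                                # dx < 0 side: dx = -(r-k)
--             within.add((x - r + k, y + k))
--             within.add((x - r + k, y - k))
--         within.add((x, y + r))                            # dx = 0 column
--         within.add((x, y - r))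
--     return within
-- ===== Notes on version B (the rewrite author's own statement) =====
-- stated objective: simpler
-- what changed: Replaced the ring-by-ring BFS (frontier list expanded by four moves with a visited-set membership test) by a direct arithmetic enumeration of each Manhattan ring |dx|+|dy| = r for r = 1..steps, so no frontier and no membership pruning is needed.
import Mathlib
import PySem

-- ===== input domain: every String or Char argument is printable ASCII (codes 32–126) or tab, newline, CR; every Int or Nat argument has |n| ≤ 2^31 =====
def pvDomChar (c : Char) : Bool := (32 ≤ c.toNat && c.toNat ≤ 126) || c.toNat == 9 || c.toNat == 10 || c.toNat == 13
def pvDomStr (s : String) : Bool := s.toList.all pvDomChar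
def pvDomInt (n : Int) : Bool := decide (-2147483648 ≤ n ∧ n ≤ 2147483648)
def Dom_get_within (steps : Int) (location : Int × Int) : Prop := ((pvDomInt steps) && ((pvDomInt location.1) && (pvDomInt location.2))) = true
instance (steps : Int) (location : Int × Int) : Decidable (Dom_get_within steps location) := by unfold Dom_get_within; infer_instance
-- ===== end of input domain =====

-- B replaces A's ring-by-ring BFS (frontier list + visited-set pruning) by a direct arithmetic
-- enumeration of each Manhattan ring; objective: simpler. Both Pythons return a set, modelled
-- here as its distinct-element list in insertion order.

-- ===== PORT A =====
def get_within (steps : Int) (location : Int × Int) : List (Int × Int) :=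
  let possible_moves : List (Int × Int) := [(1, 0), (-1, 0), (0, 1), (0, -1)]
  let final :=
    (PySem.List.pyRange 0 steps 1).foldl
      (fun (st : List (Int × Int) × List (Int × Int)) _ =>
        st.2.foldl
          (fun (acc : List (Int × Int) × List (Int × Int)) pos =>
            possible_moves.foldl
              (fun (acc2 : List (Int × Int) × List (Int × Int)) move =>
                let new_pos := (pos.1 + move.1, pos.2 + move.2)
                if new_pos ∈ acc2.1 then acc2
                else (PySem.Set.add acc2.1 new_pos, acc2.2 ++ [new_pos]))
              acc)
          (st.1, ([] : List (Int × Int))))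
      (PySem.Set.ofList [location], [location])
  final.1

-- ===== PORT B =====
def get_within_alt (steps : Int) (location : Int × Int) : List (Int × Int) :=
  let x := location.1
  let y := location.2
  (PySem.List.pyRange 1 (steps + 1) 1).foldl
    (fun within r =>
      let w1 := (PySem.List.pyRange 0 r 1).foldl
        (fun w k => PySem.Set.add (PySem.Set.add w (x + r - k, y + k)) (x + r - k, y - k))
        within
      let w2 := (PySem.List.pyRange 0 r 1).foldl
        (fun w k => PySem.Set.add (PySem.Set.add w (x - r + k, y + k)) (x - r + k, y - k))
        w1
      PySem.Set.add (PySem.Set.add w2 (x, y + r)) (x, y - r))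
    (PySem.Set.ofList [location])

-- ===== PRECONDITION & SPEC =====
def Spec_get_within (steps : Int) (location : Int × Int) (out : List (Int × Int)) : Prop := out = get_within_alt steps location
instance (steps : Int) (location : Int × Int) (out : List (Int × Int)) : Decidable (Spec_get_within steps location out) := by unfold Spec_get_within; infer_instance

-- ===== CLAIM (what is proved, stated in full; the proofs are below) =====
def Claim_equal_get_within : Prop := ∀ (steps : Int) (location : Int × Int), Dom_get_within steps location → Spec_get_within steps location (get_within steps location)

-- ===== LEMMAS AND PROOFS =====

-- Both programs compute `withinL x y steps.toNat`: the location followed by the Manhattan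
-- rings 1..steps, each ring listed as dx = r..1 (with +dy before -dy), then dx = -r..-1,
-- then dx = 0 — which is exactly A's BFS insertion order and B's enumeration order.

def posPre (x y : Int) (r k : Nat) : List (Int × Int) :=
  (List.range k).flatMap (fun (j : Nat) =>
    if j = 0 then [(x + (r : Int), y)]
    else [(x + (r : Int) - (j : Int), y + (j : Int)), (x + (r : Int) - (j : Int), y - (j : Int))])

lemma mem_posPre {x y : Int} {r k : Nat} (hk : k ≤ r) {p : Int × Int} :
    p ∈ posPre x y r k ↔
      (1 ≤ p.1 - x ∧ p.1 - x + ((p.2 - y).natAbs : Int) = r ∧ (p.2 - y).natAbs < k) := by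
  constructor
  · intro hmem
    obtain ⟨j, hj, hp⟩ := List.mem_flatMap.mp hmem
    have hjk : j < k := List.mem_range.mp hj
    by_cases h0 : j = 0
    · subst h0; simp at hp
      subst hp; simp; omega
    · simp [h0] at hp
      rcases hp with hp | hp <;> (subst hp; simp; omega)
  · rintro ⟨h1, h2, h3⟩
    apply List.mem_flatMap.mpr
    refine ⟨(p.2 - y).natAbs, List.mem_range.mpr h3, ?_⟩
    by_cases h0 : (p.2 - y).natAbs = 0
    · rw [if_pos h0, List.mem_singleton, Prod.ext_iff]; omega
    · rw [if_neg h0, List.mem_cons, List.mem_singleton]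
      rcases Int.natAbs_eq (p.2 - y) with he | he
      · left; rw [Prod.ext_iff]; omega
      · right; rw [Prod.ext_iff]; omega

def negPre (x y : Int) (r k : Nat) : List (Int × Int) :=
  (List.range k).flatMap (fun (j : Nat) =>
    if j = 0 then [(x - (r : Int), y)]
    else [(x - (r : Int) + (j : Int), y + (j : Int)), (x - (r : Int) + (j : Int), y - (j : Int))])

def zeroSeg (x y : Int) (r : Nat) : List (Int × Int) := [(x, y + (r : Int)), (x, y - (r : Int))]

def ringL (x y : Int) : Nat → List (Int × Int)
  | 0 => [(x, y)]
  | (s + 1) => posPre x y (s + 1) (s + 1) ++ negPre x y (s + 1) (s + 1) ++ zeroSeg x y (s + 1)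

def withinL (x y : Int) (r : Nat) : List (Int × Int) :=
  (x, y) :: (List.range r).flatMap (fun i => ringL x y (i + 1))

lemma mem_negPre {x y : Int} {r k : Nat} (hk : k ≤ r) {p : Int × Int} :
    p ∈ negPre x y r k ↔
      (p.1 - x ≤ -1 ∧ x - p.1 + ((p.2 - y).natAbs : Int) = r ∧ (p.2 - y).natAbs < k) := by
  constructor
  · intro hmem
    obtain ⟨j, hj, hp⟩ := List.mem_flatMap.mp hmem
    have hjk : j < k := List.mem_range.mp hj
    by_cases h0 : j = 0
    · subst h0; simp at hp
      subst hp; simp; omega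
    · simp [h0] at hp
      rcases hp with hp | hp <;> (subst hp; simp; omega)
  · rintro ⟨h1, h2, h3⟩
    apply List.mem_flatMap.mpr
    refine ⟨(p.2 - y).natAbs, List.mem_range.mpr h3, ?_⟩
    by_cases h0 : (p.2 - y).natAbs = 0
    · rw [if_pos h0, List.mem_singleton, Prod.ext_iff]; omega
    · rw [if_neg h0, List.mem_cons, List.mem_singleton]
      rcases Int.natAbs_eq (p.2 - y) with he | he
      · left; rw [Prod.ext_iff]; omega
      · right; rw [Prod.ext_iff]; omega

lemma mem_zeroSeg {x y : Int} {r : Nat} {p : Int × Int} :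
    p ∈ zeroSeg x y r ↔ (p.1 = x ∧ (p.2 - y).natAbs = r) := by
  rw [zeroSeg, List.mem_cons, List.mem_singleton, Prod.ext_iff, Prod.ext_iff]
  omega

lemma mem_ringL {x y : Int} {r : Nat} {p : Int × Int} :
    p ∈ ringL x y r ↔ (p.1 - x).natAbs + (p.2 - y).natAbs = r := by
  cases r with
  | zero => rw [ringL, List.mem_singleton, Prod.ext_iff]; omega
  | succ s =>
    rw [ringL, List.mem_append, List.mem_append,
      mem_posPre (Nat.le_refl _), mem_negPre (Nat.le_refl _), mem_zeroSeg]
    omega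

lemma withinL_succ (x y : Int) (r : Nat) :
    withinL x y (r + 1) = withinL x y r ++ ringL x y (r + 1) := by
  rw [withinL, withinL, List.range_succ, List.flatMap_append]
  simp

lemma mem_withinL {x y : Int} {r : Nat} {p : Int × Int} :
    p ∈ withinL x y r ↔ (p.1 - x).natAbs + (p.2 - y).natAbs ≤ r := by
  induction r with
  | zero => rw [withinL]; simp [Prod.ext_iff] <;> omega
  | succ s ih =>
    rw [withinL_succ, List.mem_append, ih, mem_ringL]
    omega

def nbs (p : Int × Int) : List (Int × Int) :=
  [(p.1 + 1, p.2), (p.1 - 1, p.2), (p.1, p.2 + 1), (p.1, p.2 - 1)]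

def stepf (acc : List (Int × Int) × List (Int × Int)) (c : Int × Int) :
    List (Int × Int) × List (Int × Int) :=
  if c ∈ acc.1 then acc else (acc.1 ++ [c], acc.2 ++ [c])

def gstep (base m : List (Int × Int)) (c : Int × Int) : List (Int × Int) :=
  if c ∈ base ++ m then m else m ++ [c]

lemma gstep_keep {base m : List (Int × Int)} {c : Int × Int} (h : c ∉ base ++ m) :
    gstep base m c = m ++ [c] := by simp [gstep, h]

lemma gstep_skip {base m : List (Int × Int)} {c : Int × Int} (h : c ∈ base ++ m) :
    gstep base m c = m := by simp [gstep, h]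

lemma stepf_pair (cs : List (Int × Int)) :
    ∀ (base n : List (Int × Int)),
      cs.foldl stepf (base ++ n, n) =
        (base ++ cs.foldl (gstep base) n, cs.foldl (gstep base) n) := by
  induction cs with
  | nil => intro base n; simp
  | cons c cs ih =>
    intro base n
    by_cases h : c ∈ base ++ n
    · rw [List.foldl_cons, List.foldl_cons, stepf, gstep_skip h]
      simp only [if_pos h]
      exact ih base n
    · rw [List.foldl_cons, List.foldl_cons, stepf, gstep_keep h]
      simp only [if_neg h]
      have : (base ++ n) ++ [c] = base ++ (n ++ [c]) := by rw [List.append_assoc]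
      rw [this]
      exact ih base (n ++ [c])

lemma stepA_pos (x y : Int) (r k : Nat) (h1 : 1 ≤ k) (h2 : k + 1 ≤ r) :
    ([((x + (r:Int) - (k:Int), y + (k:Int)) : Int × Int), (x + (r:Int) - (k:Int), y - (k:Int))].flatMap nbs).foldl
        (gstep (withinL x y r)) (posPre x y (r + 1) (k + 1)) = posPre x y (r + 1) (k + 2) := by
  have hk : k + 1 ≤ r + 1 := by omega
  simp only [List.flatMap_cons, List.flatMap_nil, List.append_nil, nbs, List.foldl_append, List.foldl_cons, List.foldl_nil]
  have hc1 : ((x + (r:Int) - (k:Int) + 1, y + (k:Int)) : Int × Int) ∈ withinL x y r ++ posPre x y (r + 1) (k + 1) := by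
    simp [mem_withinL, mem_posPre hk] <;> omega
  rw [gstep_skip hc1]
  have hc2 : ((x + (r:Int) - (k:Int) - 1, y + (k:Int)) : Int × Int) ∈ withinL x y r ++ posPre x y (r + 1) (k + 1) := by
    simp [mem_withinL, mem_posPre hk] <;> omega
  rw [gstep_skip hc2]
  have hc3 : ((x + (r:Int) - (k:Int), y + (k:Int) + 1) : Int × Int) ∉ withinL x y r ++ posPre x y (r + 1) (k + 1) := by
    simp [mem_withinL, mem_posPre hk] <;> omega
  rw [gstep_keep hc3]
  have hc4 : ((x + (r:Int) - (k:Int), y + (k:Int) - 1) : Int × Int) ∈ withinL x y r ++ (posPre x y (r + 1) (k + 1) ++ [(x + (r:Int) - (k:Int), y + (k:Int) + 1)]) := by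
    simp [mem_withinL, mem_posPre hk] <;> omega
  rw [gstep_skip hc4]
  have hc5 : ((x + (r:Int) - (k:Int) + 1, y - (k:Int)) : Int × Int) ∈ withinL x y r ++ (posPre x y (r + 1) (k + 1) ++ [(x + (r:Int) - (k:Int), y + (k:Int) + 1)]) := by
    simp [mem_withinL, mem_posPre hk] <;> omega
  rw [gstep_skip hc5]
  have hc6 : ((x + (r:Int) - (k:Int) - 1, y - (k:Int)) : Int × Int) ∈ withinL x y r ++ (posPre x y (r + 1) (k + 1) ++ [(x + (r:Int) - (k:Int), y + (k:Int) + 1)]) := by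
    simp [mem_withinL, mem_posPre hk] <;> omega
  rw [gstep_skip hc6]
  have hc7 : ((x + (r:Int) - (k:Int), y - (k:Int) + 1) : Int × Int) ∈ withinL x y r ++ (posPre x y (r + 1) (k + 1) ++ [(x + (r:Int) - (k:Int), y + (k:Int) + 1)]) := by
    simp [mem_withinL, mem_posPre hk] <;> omega
  rw [gstep_skip hc7]
  have hc8 : ((x + (r:Int) - (k:Int), y - (k:Int) - 1) : Int × Int) ∉ withinL x y r ++ (posPre x y (r + 1) (k + 1) ++ [(x + (r:Int) - (k:Int), y + (k:Int) + 1)]) := by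
    simp [mem_withinL, mem_posPre hk] <;> omega
  rw [gstep_keep hc8]
  have e : posPre x y (r + 1) (k + 2) = posPre x y (r + 1) (k + 1) ++
      [(x + ((r+1:Nat):Int) - ((k+1:Nat):Int), y + ((k+1:Nat):Int)), (x + ((r+1:Nat):Int) - ((k+1:Nat):Int), y - ((k+1:Nat):Int))] := by
    rw [posPre, List.range_succ, List.flatMap_append]
    simp [posPre]
  rw [e, List.append_assoc]
  congr 1
  simp [Prod.ext_iff] <;> omega

lemma roundA_pos_base (x y : Int) (r : Nat) (hr : 1 ≤ r) :
    ((posPre x y r 1).flatMap nbs).foldl (gstep (withinL x y r)) [] = posPre x y (r + 1) 2 := by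
  have e1 : posPre x y r 1 = [(x + (r : Int), y)] := by simp [posPre]
  rw [e1]
  simp only [List.flatMap_cons, List.flatMap_nil, List.append_nil, nbs, List.foldl_cons, List.foldl_nil]
  have h1 : ((x + (r:Int) + 1, y)) ∉ withinL x y r ++ ([] : List (Int × Int)) := by
    simp [mem_withinL] <;> omega
  rw [gstep_keep h1]
  simp only [List.nil_append]
  have h2 : ((x + (r:Int) - 1, y)) ∈ withinL x y r ++ [(x + (r:Int) + 1, y)] := by
    simp [mem_withinL]; left; omega
  rw [gstep_skip h2]
  have h3 : ((x + (r:Int), y + 1)) ∉ withinL x y r ++ [(x + (r:Int) + 1, y)] := by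
    simp [mem_withinL, Prod.ext_iff] <;> omega
  rw [gstep_keep h3]
  have h4 : ((x + (r:Int), y - 1)) ∉ withinL x y r ++ ([(x + (r:Int) + 1, y)] ++ [(x + (r:Int), y + 1)]) := by
    simp [mem_withinL, Prod.ext_iff] <;> omega
  rw [gstep_keep h4]
  have e2 : posPre x y (r + 1) 2 = [(x + ((r:Nat)+1 : Int), y), (x + ((r+1:Nat) : Int) - 1, y + 1), (x + ((r+1:Nat) : Int) - 1, y - 1)] := by
    simp [posPre, List.range_succ]
  rw [e2]
  simp [Prod.ext_iff] <;> omega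

lemma roundA_pos (x y : Int) (r : Nat) :
    ∀ m : Nat, m + 1 ≤ r →
      ((posPre x y r (m + 1)).flatMap nbs).foldl (gstep (withinL x y r)) [] =
        posPre x y (r + 1) (m + 2) := by
  intro m
  induction m with
  | zero => intro h; exact roundA_pos_base x y r h
  | succ m ih =>
    intro h
    have e : posPre x y r (m + 2) = posPre x y r (m + 1) ++
        [(x + (r:Int) - ((m+1:Nat):Int), y + ((m+1:Nat):Int)), (x + (r:Int) - ((m+1:Nat):Int), y - ((m+1:Nat):Int))] := by
      rw [posPre, List.range_succ, List.flatMap_append]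
      simp [posPre]
    rw [e, List.flatMap_append, List.foldl_append, ih (by omega)]
    exact stepA_pos x y r (m + 1) (by omega) (by omega)

lemma stepA_neg (x y : Int) (r k : Nat) (h1 : 1 ≤ k) (h2 : k + 1 ≤ r) :
    ([((x - (r:Int) + (k:Int), y + (k:Int)) : Int × Int), (x - (r:Int) + (k:Int), y - (k:Int))].flatMap nbs).foldl
        (gstep (withinL x y r)) (posPre x y (r + 1) (r + 1) ++ negPre x y (r + 1) (k + 1)) =
      posPre x y (r + 1) (r + 1) ++ negPre x y (r + 1) (k + 2) := by
  have hk : k + 1 ≤ r + 1 := by omega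
  have hr : r + 1 ≤ r + 1 := le_refl _
  simp only [List.flatMap_cons, List.flatMap_nil, List.append_nil, nbs, List.foldl_append, List.foldl_cons, List.foldl_nil]
  have hc1 : ((x - (r:Int) + (k:Int) + 1, y + (k:Int)) : Int × Int) ∈ withinL x y r ++ (posPre x y (r + 1) (r + 1) ++ negPre x y (r + 1) (k + 1)) := by
    simp [mem_withinL, mem_posPre hr, mem_negPre hk] <;> omega
  rw [gstep_skip hc1]
  have hc2 : ((x - (r:Int) + (k:Int) - 1, y + (k:Int)) : Int × Int) ∈ withinL x y r ++ (posPre x y (r + 1) (r + 1) ++ negPre x y (r + 1) (k + 1)) := by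
    simp [mem_withinL, mem_posPre hr, mem_negPre hk] <;> omega
  rw [gstep_skip hc2]
  have hc3 : ((x - (r:Int) + (k:Int), y + (k:Int) + 1) : Int × Int) ∉ withinL x y r ++ (posPre x y (r + 1) (r + 1) ++ negPre x y (r + 1) (k + 1)) := by
    simp [mem_withinL, mem_posPre hr, mem_negPre hk] <;> omega
  rw [gstep_keep hc3]
  have hc4 : ((x - (r:Int) + (k:Int), y + (k:Int) - 1) : Int × Int) ∈ withinL x y r ++ (posPre x y (r + 1) (r + 1) ++ negPre x y (r + 1) (k + 1) ++ [(x - (r:Int) + (k:Int), y + (k:Int) + 1)]) := by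
    simp [mem_withinL, mem_posPre hr, mem_negPre hk] <;> omega
  rw [gstep_skip hc4]
  have hc5 : ((x - (r:Int) + (k:Int) + 1, y - (k:Int)) : Int × Int) ∈ withinL x y r ++ (posPre x y (r + 1) (r + 1) ++ negPre x y (r + 1) (k + 1) ++ [(x - (r:Int) + (k:Int), y + (k:Int) + 1)]) := by
    simp [mem_withinL, mem_posPre hr, mem_negPre hk] <;> omega
  rw [gstep_skip hc5]
  have hc6 : ((x - (r:Int) + (k:Int) - 1, y - (k:Int)) : Int × Int) ∈ withinL x y r ++ (posPre x y (r + 1) (r + 1) ++ negPre x y (r + 1) (k + 1) ++ [(x - (r:Int) + (k:Int), y + (k:Int) + 1)]) := by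
    simp [mem_withinL, mem_posPre hr, mem_negPre hk] <;> omega
  rw [gstep_skip hc6]
  have hc7 : ((x - (r:Int) + (k:Int), y - (k:Int) + 1) : Int × Int) ∈ withinL x y r ++ (posPre x y (r + 1) (r + 1) ++ negPre x y (r + 1) (k + 1) ++ [(x - (r:Int) + (k:Int), y + (k:Int) + 1)]) := by
    simp [mem_withinL, mem_posPre hr, mem_negPre hk] <;> omega
  rw [gstep_skip hc7]
  have hc8 : ((x - (r:Int) + (k:Int), y - (k:Int) - 1) : Int × Int) ∉ withinL x y r ++ (posPre x y (r + 1) (r + 1) ++ negPre x y (r + 1) (k + 1) ++ [(x - (r:Int) + (k:Int), y + (k:Int) + 1)]) := by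
    simp [mem_withinL, mem_posPre hr, mem_negPre hk] <;> omega
  rw [gstep_keep hc8]
  have e : negPre x y (r + 1) (k + 2) = negPre x y (r + 1) (k + 1) ++
      [(x - ((r+1:Nat):Int) + ((k+1:Nat):Int), y + ((k+1:Nat):Int)), (x - ((r+1:Nat):Int) + ((k+1:Nat):Int), y - ((k+1:Nat):Int))] := by
    rw [negPre, List.range_succ, List.flatMap_append]
    simp [negPre]
  rw [e]
  simp [Prod.ext_iff] <;> omega

lemma roundA_neg_base (x y : Int) (r : Nat) (hr : 1 ≤ r) :
    ((negPre x y r 1).flatMap nbs).foldl (gstep (withinL x y r)) (posPre x y (r + 1) (r + 1)) =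
      posPre x y (r + 1) (r + 1) ++ negPre x y (r + 1) 2 := by
  have hr1 : r + 1 ≤ r + 1 := le_refl _
  have e1 : negPre x y r 1 = [(x - (r : Int), y)] := by simp [negPre]
  rw [e1]
  simp only [List.flatMap_cons, List.flatMap_nil, List.append_nil, nbs, List.foldl_cons, List.foldl_nil]
  have h1 : ((x - (r:Int) + 1, y)) ∈ withinL x y r ++ posPre x y (r + 1) (r + 1) := by
    simp [mem_withinL, mem_posPre hr1] <;> omega
  rw [gstep_skip h1]
  have h2 : ((x - (r:Int) - 1, y)) ∉ withinL x y r ++ posPre x y (r + 1) (r + 1) := by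
    simp [mem_withinL, mem_posPre hr1] <;> omega
  rw [gstep_keep h2]
  have h3 : ((x - (r:Int), y + 1)) ∉ withinL x y r ++ (posPre x y (r + 1) (r + 1) ++ [(x - (r:Int) - 1, y)]) := by
    simp [mem_withinL, mem_posPre hr1, Prod.ext_iff] <;> omega
  rw [gstep_keep h3]
  have h4 : ((x - (r:Int), y - 1)) ∉ withinL x y r ++ (posPre x y (r + 1) (r + 1) ++ [(x - (r:Int) - 1, y)] ++ [(x - (r:Int), y + 1)]) := by
    simp [mem_withinL, mem_posPre hr1, Prod.ext_iff] <;> omega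
  rw [gstep_keep h4]
  have e2 : negPre x y (r + 1) 2 = [(x - ((r:Nat)+1 : Int), y), (x - ((r+1:Nat) : Int) + 1, y + 1), (x - ((r+1:Nat) : Int) + 1, y - 1)] := by
    simp [negPre, List.range_succ]
  rw [e2]
  simp [Prod.ext_iff] <;> omega

lemma roundA_neg (x y : Int) (r : Nat) :
    ∀ m : Nat, m + 1 ≤ r →
      ((negPre x y r (m + 1)).flatMap nbs).foldl (gstep (withinL x y r)) (posPre x y (r + 1) (r + 1)) =
        posPre x y (r + 1) (r + 1) ++ negPre x y (r + 1) (m + 2) := by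
  intro m
  induction m with
  | zero => intro h; exact roundA_neg_base x y r h
  | succ m ih =>
    intro h
    have e : negPre x y r (m + 2) = negPre x y r (m + 1) ++
        [(x - (r:Int) + ((m+1:Nat):Int), y + ((m+1:Nat):Int)), (x - (r:Int) + ((m+1:Nat):Int), y - ((m+1:Nat):Int))] := by
      rw [negPre, List.range_succ, List.flatMap_append]
      simp [negPre]
    rw [e, List.flatMap_append, List.foldl_append, ih (by omega)]
    exact stepA_neg x y r (m + 1) (by omega) (by omega)

lemma roundA_zero (x y : Int) (r : Nat) (hr : 1 ≤ r) :
    ((zeroSeg x y r).flatMap nbs).foldl (gstep (withinL x y r))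
        (posPre x y (r + 1) (r + 1) ++ negPre x y (r + 1) (r + 1)) =
      ringL x y (r + 1) := by
  have hr1 : r + 1 ≤ r + 1 := le_refl _
  rw [zeroSeg]
  simp only [List.flatMap_cons, List.flatMap_nil, List.append_nil, nbs, List.foldl_append, List.foldl_cons, List.foldl_nil]
  have h1 : ((x + 1, y + (r:Int))) ∈ withinL x y r ++ (posPre x y (r + 1) (r + 1) ++ negPre x y (r + 1) (r + 1)) := by
    simp [mem_withinL, mem_posPre hr1, mem_negPre hr1] <;> omega
  rw [gstep_skip h1]
  have h2 : ((x - 1, y + (r:Int))) ∈ withinL x y r ++ (posPre x y (r + 1) (r + 1) ++ negPre x y (r + 1) (r + 1)) := by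
    simp [mem_withinL, mem_posPre hr1, mem_negPre hr1] <;> omega
  rw [gstep_skip h2]
  have h3 : ((x, y + (r:Int) + 1)) ∉ withinL x y r ++ (posPre x y (r + 1) (r + 1) ++ negPre x y (r + 1) (r + 1)) := by
    simp [mem_withinL, mem_posPre hr1, mem_negPre hr1] <;> omega
  rw [gstep_keep h3]
  have h4 : ((x, y + (r:Int) - 1)) ∈ withinL x y r ++ (posPre x y (r + 1) (r + 1) ++ negPre x y (r + 1) (r + 1) ++ [(x, y + (r:Int) + 1)]) := by
    simp [mem_withinL, mem_posPre hr1, mem_negPre hr1] <;> omega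
  rw [gstep_skip h4]
  have h5 : ((x + 1, y - (r:Int))) ∈ withinL x y r ++ (posPre x y (r + 1) (r + 1) ++ negPre x y (r + 1) (r + 1) ++ [(x, y + (r:Int) + 1)]) := by
    simp [mem_withinL, mem_posPre hr1, mem_negPre hr1] <;> omega
  rw [gstep_skip h5]
  have h6 : ((x - 1, y - (r:Int))) ∈ withinL x y r ++ (posPre x y (r + 1) (r + 1) ++ negPre x y (r + 1) (r + 1) ++ [(x, y + (r:Int) + 1)]) := by
    simp [mem_withinL, mem_posPre hr1, mem_negPre hr1] <;> omega
  rw [gstep_skip h6]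
  have h7 : ((x, y - (r:Int) + 1)) ∈ withinL x y r ++ (posPre x y (r + 1) (r + 1) ++ negPre x y (r + 1) (r + 1) ++ [(x, y + (r:Int) + 1)]) := by
    simp [mem_withinL, mem_posPre hr1, mem_negPre hr1] <;> omega
  rw [gstep_skip h7]
  have h8 : ((x, y - (r:Int) - 1)) ∉ withinL x y r ++ (posPre x y (r + 1) (r + 1) ++ negPre x y (r + 1) (r + 1) ++ [(x, y + (r:Int) + 1)]) := by
    simp [mem_withinL, mem_posPre hr1, mem_negPre hr1] <;> omega
  rw [gstep_keep h8]
  rw [ringL, zeroSeg]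
  simp [Prod.ext_iff] <;> omega

lemma roundA (x y : Int) (r : Nat) :
    ((ringL x y r).flatMap nbs).foldl (gstep (withinL x y r)) [] = ringL x y (r + 1) := by
  cases r with
  | zero =>
    rw [ringL]
    simp only [List.flatMap_cons, List.flatMap_nil, List.append_nil, nbs, List.foldl_cons, List.foldl_nil]
    have h1 : ((x + 1, y)) ∉ withinL x y 0 ++ ([] : List (Int × Int)) := by
      simp [mem_withinL] <;> omega
    rw [gstep_keep h1]
    simp only [List.nil_append]
    have h2 : ((x - 1, y)) ∉ withinL x y 0 ++ [(x + 1, y)] := by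
      simp [mem_withinL, Prod.ext_iff] <;> omega
    rw [gstep_keep h2]
    have h3 : ((x, y + 1)) ∉ withinL x y 0 ++ ([(x + 1, y)] ++ [(x - 1, y)]) := by
      simp [mem_withinL, Prod.ext_iff] <;> omega
    rw [gstep_keep h3]
    have h4 : ((x, y - 1)) ∉ withinL x y 0 ++ ([(x + 1, y)] ++ [(x - 1, y)] ++ [(x, y + 1)]) := by
      simp [mem_withinL, Prod.ext_iff] <;> omega
    rw [gstep_keep h4]
    rw [ringL, posPre, negPre, zeroSeg]
    simp [Prod.ext_iff]
  | succ s =>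
    rw [ringL, List.flatMap_append, List.flatMap_append, List.foldl_append, List.foldl_append]
    rw [roundA_pos x y (s + 1) s (by omega)]
    rw [roundA_neg x y (s + 1) s (by omega)]
    exact roundA_zero x y (s + 1) (by omega)

lemma onemove (acc : List (Int × Int) × List (Int × Int)) (c : Int × Int) :
    (if c ∈ acc.1 then acc else (PySem.Set.add acc.1 c, acc.2 ++ [c])) = stepf acc c := by
  by_cases h : c ∈ acc.1 <;> simp [stepf, h, PySem.Set.add_of_not_mem]

lemma innerfold (acc : List (Int × Int) × List (Int × Int)) (pos : Int × Int) :
    ([((1:Int), (0:Int)), (-1, 0), (0, 1), (0, -1)] : List (Int × Int)).foldl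
      (fun (acc2 : List (Int × Int) × List (Int × Int)) move =>
        let new_pos := (pos.1 + move.1, pos.2 + move.2)
        if new_pos ∈ acc2.1 then acc2
        else (PySem.Set.add acc2.1 new_pos, acc2.2 ++ [new_pos]))
      acc
    = (nbs pos).foldl stepf acc := by
  simp only [List.foldl_cons, List.foldl_nil, nbs, onemove, add_zero, ← sub_eq_add_neg]

lemma roundEq (x y : Int) (r : Nat) :
    (ringL x y r).foldl (fun acc pos => (nbs pos).foldl stepf acc) (withinL x y r, ([] : List (Int × Int))) =
      (withinL x y (r + 1), ringL x y (r + 1)) := by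
  rw [← List.foldl_flatMap]
  have h0 : (withinL x y r, ([] : List (Int × Int))) = (withinL x y r ++ [], []) := by simp
  rw [h0, stepf_pair, roundA, ← withinL_succ]

lemma outerA (x y : Int) (l : List Int) : ∀ (r : Nat),
    l.foldl
      (fun (st : List (Int × Int) × List (Int × Int)) (_ : Int) =>
        st.2.foldl (fun acc pos => (nbs pos).foldl stepf acc) (st.1, ([] : List (Int × Int))))
      (withinL x y r, ringL x y r)
    = (withinL x y (r + l.length), ringL x y (r + l.length)) := by
  induction l with
  | nil => intro r; simp
  | cons a l ih =>
    intro r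
    rw [List.foldl_cons]
    have : (withinL x y r, ringL x y r).2.foldl (fun acc pos => (nbs pos).foldl stepf acc)
        ((withinL x y r, ringL x y r).1, ([] : List (Int × Int))) = (withinL x y (r + 1), ringL x y (r + 1)) :=
      roundEq x y r
    rw [this, ih (r + 1)]
    have e : r + 1 + l.length = r + (l.length + 1) := by omega
    rw [e]; rfl

lemma get_within_eq (steps : Int) (location : Int × Int) :
    get_within steps location = withinL location.1 location.2 steps.toNat := by
  rw [get_within]
  simp only [innerfold]
  have hof : PySem.Set.ofList [location] = [location] := by
    simp [PySem.Set.ofList_eq_self_of_nodup]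
  rw [hof]
  rw [show (([location] : List (Int × Int)), ([location] : List (Int × Int))) =
      (withinL location.1 location.2 0, ringL location.1 location.2 0) from by simp [withinL, ringL]]
  rw [outerA, PySem.List.length_pyRange_one]
  simp

lemma roundB_pos (x y : Int) (s : Nat) : ∀ k : Nat, k ≤ s + 1 →
    (List.range k).foldl
        (fun w (j : Nat) => PySem.Set.add
          (PySem.Set.add w (x + (((s+1:Nat)):Int) - (j:Int), y + (j:Int)))
          (x + (((s+1:Nat)):Int) - (j:Int), y - (j:Int)))
        (withinL x y s) =
      withinL x y s ++ posPre x y (s + 1) k := by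
  intro k
  induction k with
  | zero => intro _; simp [posPre]
  | succ k ih =>
    intro hk
    have hk' : k ≤ s + 1 := by omega
    rw [List.range_succ, List.foldl_append, List.foldl_cons, List.foldl_nil, ih hk']
    have h1 : ((x + (((s+1:Nat)):Int) - (k:Int), y + (k:Int)) : Int × Int) ∉
        withinL x y s ++ posPre x y (s + 1) k := by
      simp [mem_withinL, mem_posPre hk'] <;> omega
    rw [PySem.Set.add_of_not_mem h1]
    by_cases hk0 : k = 0
    · subst hk0
      have h2 : ((x + (((s+1:Nat)):Int) - ((0:Nat):Int), y - ((0:Nat):Int)) : Int × Int) ∈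
          withinL x y s ++ posPre x y (s + 1) 0 ++ [(x + (((s+1:Nat)):Int) - ((0:Nat):Int), y + ((0:Nat):Int))] := by
        simp [Prod.ext_iff]
      rw [PySem.Set.add_of_mem h2]
      have e : posPre x y (s + 1) 1 = [(x + ((s+1:Nat) : Int), y)] := by simp [posPre]
      rw [e, List.append_assoc]
      simp [Prod.ext_iff, posPre]
    · have h2 : ((x + (((s+1:Nat)):Int) - (k:Int), y - (k:Int)) : Int × Int) ∉
          withinL x y s ++ posPre x y (s + 1) k ++ [(x + (((s+1:Nat)):Int) - (k:Int), y + (k:Int))] := by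
        simp [mem_withinL, mem_posPre hk', Prod.ext_iff] <;> omega
      rw [PySem.Set.add_of_not_mem h2]
      have e : posPre x y (s + 1) (k + 1) = posPre x y (s + 1) k ++
          [(x + ((s+1:Nat):Int) - ((k:Nat):Int), y + ((k:Nat):Int)), (x + ((s+1:Nat):Int) - ((k:Nat):Int), y - ((k:Nat):Int))] := by
        rw [posPre, List.range_succ, List.flatMap_append]
        simp [posPre, hk0]
      rw [e]
      simp [Prod.ext_iff]

lemma roundB_neg (x y : Int) (s : Nat) : ∀ k : Nat, k ≤ s + 1 →
    (List.range k).foldl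
        (fun w (j : Nat) => PySem.Set.add
          (PySem.Set.add w (x - (((s+1:Nat)):Int) + (j:Int), y + (j:Int)))
          (x - (((s+1:Nat)):Int) + (j:Int), y - (j:Int)))
        (withinL x y s ++ posPre x y (s + 1) (s + 1)) =
      withinL x y s ++ posPre x y (s + 1) (s + 1) ++ negPre x y (s + 1) k := by
  intro k
  have hs1 : s + 1 ≤ s + 1 := le_refl _
  induction k with
  | zero => intro _; simp [negPre]
  | succ k ih =>
    intro hk
    have hk' : k ≤ s + 1 := by omega
    rw [List.range_succ, List.foldl_append, List.foldl_cons, List.foldl_nil, ih hk']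
    have h1 : ((x - (((s+1:Nat)):Int) + (k:Int), y + (k:Int)) : Int × Int) ∉
        withinL x y s ++ posPre x y (s + 1) (s + 1) ++ negPre x y (s + 1) k := by
      simp [mem_withinL, mem_posPre hs1, mem_negPre hk'] <;> omega
    rw [PySem.Set.add_of_not_mem h1]
    by_cases hk0 : k = 0
    · subst hk0
      have h2 : ((x - (((s+1:Nat)):Int) + ((0:Nat):Int), y - ((0:Nat):Int)) : Int × Int) ∈
          withinL x y s ++ posPre x y (s + 1) (s + 1) ++ negPre x y (s + 1) 0 ++ [(x - (((s+1:Nat)):Int) + ((0:Nat):Int), y + ((0:Nat):Int))] := by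
        simp [Prod.ext_iff]
      rw [PySem.Set.add_of_mem h2]
      have e : negPre x y (s + 1) 1 = [(x - ((s+1:Nat) : Int), y)] := by simp [negPre]
      rw [e, List.append_assoc]
      simp [Prod.ext_iff, negPre]
    · have h2 : ((x - (((s+1:Nat)):Int) + (k:Int), y - (k:Int)) : Int × Int) ∉
          withinL x y s ++ posPre x y (s + 1) (s + 1) ++ negPre x y (s + 1) k ++ [(x - (((s+1:Nat)):Int) + (k:Int), y + (k:Int))] := by
        simp [mem_withinL, mem_posPre hs1, mem_negPre hk', Prod.ext_iff] <;> omega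
      rw [PySem.Set.add_of_not_mem h2]
      have e : negPre x y (s + 1) (k + 1) = negPre x y (s + 1) k ++
          [(x - ((s+1:Nat):Int) + ((k:Nat):Int), y + ((k:Nat):Int)), (x - ((s+1:Nat):Int) + ((k:Nat):Int), y - ((k:Nat):Int))] := by
        rw [negPre, List.range_succ, List.flatMap_append]
        simp [negPre, hk0]
      rw [e]
      simp [Prod.ext_iff]

lemma roundB_zero (x y : Int) (s : Nat) :
    PySem.Set.add
      (PySem.Set.add (withinL x y s ++ posPre x y (s + 1) (s + 1) ++ negPre x y (s + 1) (s + 1))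
        (x, y + ((s+1:Nat):Int)))
      (x, y - ((s+1:Nat):Int)) = withinL x y (s + 1) := by
  have hs1 : s + 1 ≤ s + 1 := le_refl _
  have h1 : ((x, y + ((s+1:Nat):Int)) : Int × Int) ∉
      withinL x y s ++ posPre x y (s + 1) (s + 1) ++ negPre x y (s + 1) (s + 1) := by
    simp [mem_withinL, mem_posPre hs1, mem_negPre hs1] <;> omega
  rw [PySem.Set.add_of_not_mem h1]
  have h2 : ((x, y - ((s+1:Nat):Int)) : Int × Int) ∉
      withinL x y s ++ posPre x y (s + 1) (s + 1) ++ negPre x y (s + 1) (s + 1) ++ [(x, y + ((s+1:Nat):Int))] := by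
    simp [mem_withinL, mem_posPre hs1, mem_negPre hs1, Prod.ext_iff] <;> omega
  rw [PySem.Set.add_of_not_mem h2]
  rw [withinL_succ, ringL, zeroSeg]
  simp

lemma ringstepB (x y : Int) (s : Nat) :
    (fun (within : List (Int × Int)) (r : Int) =>
      let w1 := (PySem.List.pyRange 0 r 1).foldl
        (fun w k => PySem.Set.add (PySem.Set.add w (x + r - k, y + k)) (x + r - k, y - k)) within
      let w2 := (PySem.List.pyRange 0 r 1).foldl
        (fun w k => PySem.Set.add (PySem.Set.add w (x - r + k, y + k)) (x - r + k, y - k)) w1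
      PySem.Set.add (PySem.Set.add w2 (x, y + r)) (x, y - r))
      (withinL x y s) (((s+1:Nat)):Int) = withinL x y (s + 1) := by
  simp only [PySem.List.pyRange_zero_natCast, List.foldl_map]
  rw [roundB_pos x y s (s + 1) (le_refl _), roundB_neg x y s (s + 1) (le_refl _), roundB_zero x y s]

lemma outerB (x y : Int) : ∀ n : Nat,
    (PySem.List.pyRange 1 ((n:Int) + 1) 1).foldl
      (fun (within : List (Int × Int)) (r : Int) =>
        let w1 := (PySem.List.pyRange 0 r 1).foldl
          (fun w k => PySem.Set.add (PySem.Set.add w (x + r - k, y + k)) (x + r - k, y - k)) within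
        let w2 := (PySem.List.pyRange 0 r 1).foldl
          (fun w k => PySem.Set.add (PySem.Set.add w (x - r + k, y + k)) (x - r + k, y - k)) w1
        PySem.Set.add (PySem.Set.add w2 (x, y + r)) (x, y - r))
      (withinL x y 0) = withinL x y n := by
  intro n
  induction n with
  | zero => rw [show ((0:Nat):Int) + 1 = 1 by norm_num, PySem.List.pyRange_one_eq_nil (le_refl _), List.foldl_nil]
  | succ n ih =>
    have e : ((n+1:Nat):Int) + 1 = ((n:Int) + 1) + 1 := by push_cast; ring
    rw [e, PySem.List.pyRange_one_succ_right (by omega), List.foldl_append, ih, List.foldl_cons, List.foldl_nil]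
    rw [show ((n:Int) + 1) = ((n+1:Nat):Int) by push_cast; ring]
    exact ringstepB x y n

lemma get_within_alt_eq (steps : Int) (location : Int × Int) :
    get_within_alt steps location = withinL location.1 location.2 steps.toNat := by
  rw [get_within_alt]
  simp only []
  have hof : PySem.Set.ofList [location] = [location] := by
    simp [PySem.Set.ofList_eq_self_of_nodup]
  have hw0 : ([location] : List (Int × Int)) = withinL location.1 location.2 0 := by
    simp [withinL]
  rw [hof, hw0]
  by_cases h : 0 ≤ steps
  · rw [show steps + 1 = ((steps.toNat : Int) + 1) by omega]
    exact outerB location.1 location.2 steps.toNat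
  · rw [PySem.List.pyRange_one_eq_nil (by omega), List.foldl_nil]
    rw [show steps.toNat = 0 by omega]

-- ===== VERDICT (by name: the statement is the Claim_ definition above) =====
theorem get_within_spec : Claim_equal_get_within := by
  intro steps location _
  unfold Spec_get_within
  rw [get_within_eq, get_within_alt_eq]
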